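-- pv_equiv track=rewrite | github.com/moledoc/aoc | python/2024d12.py | prepare_nested_region_handling
-- ===== SOURCE A (Python) =====
-- dirs = [(-1, 0), (0, 1), (1, 0), (0, -1)]
--
-- def mark_outside_of_region(grid, r, c, seen):
-- 	if r < 0 or c < 0 or r >= len(grid) or c >= len(grid[0]):
-- 		return
-- 	if grid[r][c] >= 0:
-- 		return
-- 	if seen[r][c] == 1:
-- 		return
-- 	if grid[r][c] < 0:
-- 		grid[r][c] = -100
-- 	seen[r][c] = 1
-- 	for dr, dc in dirs:
-- 		mark_outside_of_region(grid, r+dr, c+dc, seen)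
--
-- def prepare_nested_region_handling(grid):
-- 	# add padding to prepped, for easier flood fill outside area
-- 	prepped = [[-100 for c in range(len(grid[0])+2)] for r in range(len(grid)+2)]
-- 	for r in range(len(grid)):
-- 		for c in range(len(grid[0])):
-- 			prepped[r+1][c+1] = grid[r][c]
-- 	seen = [[0 for c in range(len(prepped[0]))] for r in range(len(prepped))]
--
-- 	# mark outside of the region to distinguish nested region from other regions
-- 	# by flood fill padded grid
-- 	mark_outside_of_region(prepped, 0, 0, seen)
--
-- 	# mark inner region as pos and everything else neg
-- 	for r in range(len(prepped)):
-- 		for c in range(len(prepped[0])):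
-- 			if prepped[r][c] == -1:
-- 				prepped[r][c] = 0
-- 			else:
-- 				prepped[r][c] = -1
-- 	return prepped
-- ===== SOURCE B (Python) =====
-- dirs = [(-1, 0), (0, 1), (1, 0), (0, -1)]
--
-- def prepare_nested_region_handling(grid):
-- 	# add padding to prepped, for easier flood fill outside area
-- 	prepped = [[-100 for c in range(len(grid[0])+2)] for r in range(len(grid)+2)]
-- 	for r in range(len(grid)):
-- 		for c in range(len(grid[0])):
-- 			prepped[r+1][c+1] = grid[r][c]
-- 	seen = [[0 for c in range(len(prepped[0]))] for r in range(len(prepped))]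
--
-- 	# iterative flood fill with an explicit stack instead of recursion
-- 	stack = [(0, 0)]
-- 	while stack:
-- 		r, c = stack.pop()
-- 		if r < 0 or c < 0 or r >= len(prepped) or c >= len(prepped[0]):
-- 			continue
-- 		if prepped[r][c] >= 0:
-- 			continue
-- 		if seen[r][c] == 1:
-- 			continue
-- 		prepped[r][c] = -100
-- 		seen[r][c] = 1
-- 		# push in reverse so neighbours come off the stack in dirs order
-- 		for dr, dc in reversed(dirs):
-- 			stack.append((r+dr, c+dc))
--
-- 	# mark inner region as pos and everything else neg
-- 	for r in range(len(prepped)):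
-- 		for c in range(len(prepped[0])):
-- 			if prepped[r][c] == -1:
-- 				prepped[r][c] = 0
-- 			else:
-- 				prepped[r][c] = -1
-- 	return prepped
-- ===== Notes on version B (the rewrite author's own statement) =====
-- stated objective: alternative
-- what changed: The recursive flood fill mark_outside_of_region is replaced by an iterative depth-first fill with an explicit stack (pop a cell, apply the same guards, mark, push the four neighbours), removing the recursion entirely; the padding and relabel passes are unchanged.
import Mathlib
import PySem

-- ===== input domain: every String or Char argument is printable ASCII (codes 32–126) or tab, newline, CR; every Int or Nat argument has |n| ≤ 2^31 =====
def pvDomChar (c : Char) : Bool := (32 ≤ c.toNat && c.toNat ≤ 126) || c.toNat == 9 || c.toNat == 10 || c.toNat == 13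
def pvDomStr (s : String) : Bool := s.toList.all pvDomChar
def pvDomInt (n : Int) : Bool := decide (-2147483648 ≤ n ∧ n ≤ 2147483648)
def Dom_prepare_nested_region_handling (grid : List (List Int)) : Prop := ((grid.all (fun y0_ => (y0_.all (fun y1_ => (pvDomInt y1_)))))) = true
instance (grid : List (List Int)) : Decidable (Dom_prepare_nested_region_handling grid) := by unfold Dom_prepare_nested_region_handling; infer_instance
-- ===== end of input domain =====

-- B replaces A's recursive flood fill by an iterative one with an explicit stack (same guards, same
-- visit order via reversed pushes); padding and relabel passes are unchanged. Objective: alternative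
-- decomposition (recursion -> explicit stack). Equivalence of the return values is proved below.


-- shared small helpers for 2-D indexed access (Python's grid[r][c] read/update), used by both ports
def pvDirs : List (Int × Int) := [(-1, 0), (0, 1), (1, 0), (0, -1)]

def oob (g : List (List Int)) (r c : Int) : Bool :=
  decide (r < 0 ∨ c < 0 ∨ (g.length : Int) ≤ r ∨ ((g.headD []).length : Int) ≤ c)

def get2? (g : List (List Int)) (r c : Int) : Option Int :=
  if r < 0 ∨ c < 0 then none else (g[r.toNat]?).bind (fun row => row[c.toNat]?)

def set2 (g : List (List Int)) (r c : Int) (v : Int) : List (List Int) :=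
  if r < 0 ∨ c < 0 then g else g.set r.toNat ((g[r.toNat]?.getD []).set c.toNat v)

-- measure for termination: number of entries ≠ 1 in the seen grid
def czRow (row : List Int) : Nat := row.countP (fun x => decide (x ≠ 1))
def cz (s : List (List Int)) : Nat := (s.map czRow).sum

lemma czRow_set_lt {row : List Int} : ∀ {m : Nat} {sv : Int}, row[m]? = some sv → sv ≠ 1 →
    czRow (row.set m 1) < czRow row := by
  induction row with
  | nil => intro m sv h; simp at h
  | cons x xs ih =>
    intro m sv h hs
    cases m with
    | zero =>
      simp at h; subst h
      simp [czRow, hs]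
    | succ m =>
      simp at h
      have := ih h hs
      simp only [List.set_cons_succ, czRow, List.countP_cons]
      simp only [czRow] at this
      omega

lemma cz_set_lt {s : List (List Int)} : ∀ {n : Nat} {row : List Int} {m : Nat} {sv : Int},
    s[n]? = some row → row[m]? = some sv → sv ≠ 1 →
    cz (s.set n (row.set m 1)) < cz s := by
  induction s with
  | nil => intro n row m sv h; simp at h
  | cons x xs ih =>
    intro n row m sv hn hm hs
    cases n with
    | zero =>
      simp at hn; subst hn
      simp [cz]
      exact czRow_set_lt hm hs
    | succ n =>
      simp at hn
      have := ih hn hm hs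
      simp [cz] at *
      omega

lemma cz_set2_lt {s : List (List Int)} {r c : Int} {sv : Int}
    (h : get2? s r c = some sv) (hs : sv ≠ 1) : cz (set2 s r c 1) < cz s := by
  unfold get2? at h
  by_cases hneg : r < 0 ∨ c < 0
  · simp [hneg] at h
  · simp only [hneg, if_false] at h
    rcases hrow : s[r.toNat]? with _ | row
    · simp [hrow] at h
    · simp [hrow] at h
      unfold set2
      simp [hneg, hrow]
      exact cz_set_lt hrow h hs

-- ===== PORT A =====
-- mark_outside_of_region: literal port of A's recursion, made total with a fuel parameter (a pure
-- totality guard: the entry point below supplies fuel cz seen + 1, which the proofs show suffices);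
-- a failed grid/seen read (only reachable on inputs where Python raises) stops like a guard.
def markA : Nat → List (List Int) → Int → Int → List (List Int) → (List (List Int)) × (List (List Int))
  | 0, g, _, _, s => (g, s)
  | (f+1), g, r, c, s =>
    if oob g r c then (g, s)
    else
      match get2? g r c, get2? s r c with
      | some gv, some sv =>
        if 0 ≤ gv then (g, s)
        else if sv = 1 then (g, s)
        else
          pvDirs.foldl (fun p d => markA f p.1 (r + d.1) (c + d.2) p.2)
            ((if gv < 0 then set2 g r c (-100) else g), set2 s r c 1)
      | _, _ => (g, s)

def prepare_nested_region_handling (grid : List (List Int)) : List (List Int) :=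
  let R : Int := grid.length
  let C : Int := (grid.headD []).length
  let prepped0 := (PySem.List.pyRange 0 (R+2) 1).map
    (fun _ => (PySem.List.pyRange 0 (C+2) 1).map (fun _ => (-100 : Int)))
  let prepped := (PySem.List.pyRange 0 R 1).foldl (fun p r =>
      (PySem.List.pyRange 0 C 1).foldl (fun p c =>
        set2 p (r+1) (c+1) (PySem.List.pyGetD (PySem.List.pyGetD grid r []) c 0)) p) prepped0
  let seen := (PySem.List.pyRange 0 (prepped.length : Int) 1).map
    (fun _ => (PySem.List.pyRange 0 ((prepped.headD []).length : Int) 1).map (fun _ => (0 : Int)))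
  let marked := (markA (cz seen + 1) prepped 0 0 seen).1
  (PySem.List.pyRange 0 (marked.length : Int) 1).foldl (fun g r =>
     (PySem.List.pyRange 0 ((marked.headD []).length : Int) 1).foldl (fun g c =>
        set2 g r c (if PySem.List.pyGetD (PySem.List.pyGetD g r []) c 0 = -1 then 0 else -1)) g) marked

-- ===== PORT B =====
-- iterative flood fill: explicit stack, head = top of stack; pushing the reversed dirs in Python
-- (appending to the list end) is prepending the dirs-order neighbour list here
def loopB (g s : List (List Int)) (stack : List (Int × Int)) :
    (List (List Int)) × (List (List Int)) :=
  match stack with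
  | [] => (g, s)
  | (r, c) :: rest =>
    if oob g r c then loopB g s rest
    else
      match h1 : get2? g r c, h2 : get2? s r c with
      | some _gv, some sv =>
        if 0 ≤ _gv then loopB g s rest
        else if h : sv = 1 then loopB g s rest
        else loopB (set2 g r c (-100)) (set2 s r c 1)
          ((pvDirs.map (fun d => (r + d.1, c + d.2))) ++ rest)
      | none, _ => loopB g s rest
      | some _, none => loopB g s rest
termination_by (cz s, stack.length)
decreasing_by
  all_goals first
    | exact Prod.Lex.right _ (Nat.lt_succ_self _)
    | exact Prod.Lex.left _ _ (cz_set2_lt h2 h)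

def prepare_nested_region_handling_alt (grid : List (List Int)) : List (List Int) :=
  let R : Int := grid.length
  let C : Int := (grid.headD []).length
  let prepped0 := (PySem.List.pyRange 0 (R+2) 1).map
    (fun _ => (PySem.List.pyRange 0 (C+2) 1).map (fun _ => (-100 : Int)))
  let prepped := (PySem.List.pyRange 0 R 1).foldl (fun p r =>
      (PySem.List.pyRange 0 C 1).foldl (fun p c =>
        set2 p (r+1) (c+1) (PySem.List.pyGetD (PySem.List.pyGetD grid r []) c 0)) p) prepped0
  let seen := (PySem.List.pyRange 0 (prepped.length : Int) 1).map
    (fun _ => (PySem.List.pyRange 0 ((prepped.headD []).length : Int) 1).map (fun _ => (0 : Int)))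
  let marked := (loopB prepped seen [((0 : Int), (0 : Int))]).1
  (PySem.List.pyRange 0 (marked.length : Int) 1).foldl (fun g r =>
     (PySem.List.pyRange 0 ((marked.headD []).length : Int) 1).foldl (fun g c =>
        set2 g r c (if PySem.List.pyGetD (PySem.List.pyGetD g r []) c 0 = -1 then 0 else -1)) g) marked

-- ===== PRECONDITION & SPEC =====
-- Pre_ excludes exactly the inputs on which the Python A raises IndexError: the empty grid
-- (grid[0]) and grids with a row shorter than row 0 (grid[r][c] for c < len(grid[0])).
def Pre_prepare_nested_region_handling (grid : List (List Int)) : Prop :=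
  grid ≠ [] ∧ ∀ row ∈ grid, (grid.headD []).length ≤ row.length
instance (grid : List (List Int)) : Decidable (Pre_prepare_nested_region_handling grid) := by
  unfold Pre_prepare_nested_region_handling; infer_instance

def pvWitness_prepare_nested_region_handling : List (List Int) := [[-1, 2], [3, -1]]

def Spec_prepare_nested_region_handling (grid : List (List Int)) (out : List (List Int)) : Prop := out = prepare_nested_region_handling_alt grid
instance (grid : List (List Int)) (out : List (List Int)) : Decidable (Spec_prepare_nested_region_handling grid out) := by unfold Spec_prepare_nested_region_handling; infer_instance

-- ===== CLAIM (what is proved, stated in full; the proofs are below) =====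
def Claim_equal_prepare_nested_region_handling : Prop := ∀ (grid : List (List Int)), Dom_prepare_nested_region_handling grid → Pre_prepare_nested_region_handling grid → Spec_prepare_nested_region_handling grid (prepare_nested_region_handling grid)

-- ===== LEMMAS AND PROOFS =====

lemma czRow_set_le (row : List Int) (m : Nat) : czRow (row.set m 1) ≤ czRow row := by
  induction row generalizing m with
  | nil => simp
  | cons x xs ih =>
    cases m with
    | zero => simp [czRow, List.countP_cons]
    | succ m =>
      have := ih m
      simp [czRow, List.countP_cons] at *
      omega

lemma czRow_set_le' (s : List (List Int)) (n m : Nat) :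
    cz (s.set n ((s[n]?.getD []).set m 1)) ≤ cz s := by
  induction s generalizing n with
  | nil => simp [cz]
  | cons x xs ih =>
    cases n with
    | zero =>
      simp [cz]
      exact czRow_set_le x m
    | succ n =>
      have := ih n
      simp [cz] at *
      omega

lemma cz_set2_le (s : List (List Int)) (r c : Int) : cz (set2 s r c 1) ≤ cz s := by
  unfold set2
  by_cases hneg : r < 0 ∨ c < 0
  · simp [hneg]
  · simp [hneg]
    exact czRow_set_le' s r.toNat c.toNat

lemma markA_mono (f : Nat) : ∀ g r c s, cz (markA f g r c s).2 ≤ cz s := by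
  induction f with
  | zero => intro g r c s; simp [markA]
  | succ f ih =>
    intro g r c s
    rw [markA]
    by_cases hb : oob g r c = true
    · simp [hb]
    · simp only [hb]
      rcases hg : get2? g r c with _ | gv <;> rcases hs : get2? s r c with _ | sv <;> simp
      by_cases hgv : 0 ≤ gv
      · simp [hgv]
      · simp only [hgv, if_false]
        by_cases hsv : sv = 1
        · simp [hsv]
        · simp only [hsv, if_false]
          have haux : ∀ (l : List (Int × Int)) (p : (List (List Int)) × (List (List Int))),
              cz ((l.foldl (fun p d => markA f p.1 (r + d.1) (c + d.2) p.2) p).2) ≤ cz p.2 := by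
            intro l
            induction l with
            | nil => intro p; simp
            | cons d l ihl =>
              intro p
              simp only [List.foldl_cons]
              exact le_trans (ihl _) (ih _ _ _ _)
          exact le_trans (haux pvDirs _) (cz_set2_le s r c)

lemma markA_fuel (f : Nat) : ∀ (f' : Nat) g r c s, cz s < f → cz s < f' →
    markA f g r c s = markA f' g r c s := by
  induction f with
  | zero => intro f' g r c s h; omega
  | succ f ih =>
    intro f' g r c s h h'
    cases f' with
    | zero => omega
    | succ f' =>
      rw [markA, markA]
      by_cases hb : oob g r c = true
      · simp [hb]
      · simp only [hb]
        rcases hg : get2? g r c with _ | gv <;> rcases hs : get2? s r c with _ | sv <;> simp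
        by_cases hgv : 0 ≤ gv
        · simp [hgv]
        · simp only [hgv, if_false]
          by_cases hsv : sv = 1
          · simp [hsv]
          · simp only [hsv, if_false]
            have hlt : cz (set2 s r c 1) < cz s := cz_set2_lt hs hsv
            have haux : ∀ (l : List (Int × Int)) (p : (List (List Int)) × (List (List Int))),
                cz p.2 < f → cz p.2 < f' →
                l.foldl (fun p d => markA f p.1 (r + d.1) (c + d.2) p.2) p
                  = l.foldl (fun p d => markA f' p.1 (r + d.1) (c + d.2) p.2) p := by
              intro l
              induction l with
              | nil => intro p _ _; rfl
              | cons d l ihl =>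
                intro p hp hp'
                simp only [List.foldl_cons]
                rw [ih f' p.1 (r + d.1) (c + d.2) p.2 hp hp']
                have hm := markA_mono f' p.1 (r + d.1) (c + d.2) p.2
                exact ihl _ (by omega) (by omega)
            exact haux pvDirs _ (by show cz (set2 s r c 1) < f; omega)
              (by show cz (set2 s r c 1) < f'; omega)

lemma foldl_markA_adaptive (f : Nat) (r c : Int) :
    ∀ (l : List (Int × Int)) (p : (List (List Int)) × (List (List Int))), cz p.2 < f →
      l.foldl (fun p d => markA f p.1 (r + d.1) (c + d.2) p.2) p
        = l.foldl (fun p d => markA (cz p.2 + 1) p.1 (r + d.1) (c + d.2) p.2) p := by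
  intro l
  induction l with
  | nil => intro p _; rfl
  | cons d l ihl =>
    intro p hp
    simp only [List.foldl_cons]
    rw [markA_fuel f (cz p.2 + 1) p.1 (r + d.1) (c + d.2) p.2 hp (by omega)]
    have hm := markA_mono (cz p.2 + 1) p.1 (r + d.1) (c + d.2) p.2
    exact ihl _ (by omega)

lemma loopB_cons (g s : List (List Int)) (r c : Int) (rest : List (Int × Int)) :
    loopB g s ((r, c) :: rest) =
      if oob g r c then loopB g s rest
      else
        match get2? g r c, get2? s r c with
        | some gv, some sv =>
          if 0 ≤ gv then loopB g s rest
          else if sv = 1 then loopB g s rest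
          else loopB (set2 g r c (-100)) (set2 s r c 1)
            ((pvDirs.map (fun d => (r + d.1, c + d.2))) ++ rest)
        | none, _ => loopB g s rest
        | some _, none => loopB g s rest := by
  rw [loopB]
  by_cases hb : oob g r c = true
  · simp only [hb, if_true]
  · have hb' : oob g r c = false := by simpa using hb
    simp only [hb', Bool.false_eq_true, if_false]
    split <;> simp_all

lemma markA_succ (f : Nat) (g : List (List Int)) (r c : Int) (s : List (List Int)) :
    markA (f + 1) g r c s =
      if oob g r c then (g, s)
      else
        match get2? g r c, get2? s r c with
        | some gv, some sv =>
          if 0 ≤ gv then (g, s)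
          else if sv = 1 then (g, s)
          else
            pvDirs.foldl (fun p d => markA f p.1 (r + d.1) (c + d.2) p.2)
              ((if gv < 0 then set2 g r c (-100) else g), set2 s r c 1)
        | _, _ => (g, s) := by
  rw [markA]

lemma loopB_eq_fold : ∀ (g s : List (List Int)) (stack : List (Int × Int)),
    loopB g s stack
      = stack.foldl (fun p rc => markA (cz p.2 + 1) p.1 rc.1 rc.2 p.2) (g, s) := by
  intro g s stack
  induction g, s, stack using loopB.induct with
  | case1 g s => rw [loopB]; rfl
  | case2 g s r c rest hb ih =>
    rw [loopB_cons]
    simp only [hb, if_true, List.foldl_cons, ih]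
    rw [markA_succ]
    simp [hb]
  | case3 g s r c rest hb gv sv h1 h2 hgv ih =>
    rw [loopB_cons]
    simp only [hb, h1, h2, hgv, if_true, List.foldl_cons, ih]
    rw [markA_succ]
    simp [hb, h1, h2, hgv]
  | case4 g s r c rest hb gv h1 hgv h2 ih =>
    rw [loopB_cons]
    simp only [hb, h1, h2, hgv, if_true, if_false, List.foldl_cons, ih]
    rw [markA_succ]
    simp [hb, h1, h2, hgv]
  | case5 g s r c rest hb gv sv h1 h2 hgv hsv ih =>
    rw [loopB_cons]
    simp only [hb, h1, h2, hgv, hsv, if_false, List.foldl_cons, ih,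
      List.foldl_append]
    rw [markA_succ]
    have hglt : gv < 0 := by omega
    simp only [hb, Bool.false_eq_true, if_false, h1, h2, hgv, hsv, hglt, if_true]
    have hlt : cz (set2 s r c 1) < cz s := cz_set2_lt h2 hsv
    rw [foldl_markA_adaptive (cz s) r c pvDirs _ (by simpa using hlt)]
    rw [List.foldl_map]
  | case6 g s r c rest hb h1 ih =>
    rw [loopB_cons]
    simp only [hb, h1, List.foldl_cons, ih]
    rw [markA_succ]
    simp [hb, h1]
  | case7 g s r c rest hb gv h1 h2 ih =>
    rw [loopB_cons]
    simp only [hb, h1, h2, List.foldl_cons, ih]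
    rw [markA_succ]
    simp [hb, h1, h2]

lemma loopB_single (g s : List (List Int)) :
    loopB g s [((0 : Int), (0 : Int))] = markA (cz s + 1) g 0 0 s := by
  rw [loopB_eq_fold]
  rfl

-- ===== VERDICT (by name: the statement is the Claim_ definition above) =====
theorem prepare_nested_region_handling_spec : Claim_equal_prepare_nested_region_handling := by
  intro grid _ _
  unfold Spec_prepare_nested_region_handling
  unfold prepare_nested_region_handling prepare_nested_region_handling_alt
  simp only [loopB_single]
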